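-- pv_equiv track=rewrite | github.com/dandoug/cryptomath-book | src/utilities.py | format_factors
-- ===== SOURCE A (Python) =====
-- def format_factors(factors: list[int]) -> str:
--     """
--     Formats a list of integer factors into a mathematical expression string. The list
--     of factors represents prime factors of a number, and the output builds an expression
--     where repeated factors are represented with exponents. For example, a list of factors
--     [2, 2, 3] would result in the expression "2^2 * 3".
--
--     :param factors: A sorted list of integers representing the prime factors of a
--         number. The list must be in ascending order to correctly interpret repetitions.
--     :return: A string representation of the prime factorization in the form
--         "factor^exponent * ...", where repeated factors are grouped and represented with exponents.
--     """
--     if not factors: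
--         raise ValueError("empty list of factors")
--
--     last_factor = 0
--     last_factor_exp = 0
--     expression = ""
--     for f in factors:
--         if f < last_factor:
--             raise ValueError("factors must be positive integers and sorted in ascending order")
--         if f == last_factor:  # another instance of the same factor?
--             last_factor_exp += 1  # keeping track of the exponent
--         else:
--             # new factor, so add the previous factor to the expression, as long as it wasn't 0
--             if last_factor != 0:
--                 expression = _add_factor_to_rexpression(expression, last_factor, last_factor_exp)
--             # remember the new factor so we can add it later
--             last_factor = f
--             last_factor_exp = 1
--     # add the last one we saw
--     expression = _add_factor_to_rexpression(expression, last_factor, last_factor_exp)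
--     return expression
--
-- def _add_factor_to_rexpression(expression, factor, exp):
--     """
--     Appends a factor to the given mathematical expression with proper formatting. The
--     factor is added using a product separator if it is not the first factor
--     in the expression. An exponent is included in the output if specified.
--     """
--     if len(expression) > 0:  # not the first factor, then add \product separator
--         expression += " \\cdot "
--     if exp > 1:  # exponent required?
--         expression += f"{factor}^{exp}"
--     else:
--         expression += str(factor)
--     return expression
-- ===== SOURCE B (Python) =====
-- def format_factors(factors: list[int]) -> str:
--     if not factors:
--         raise ValueError("empty list of factors")
--     prev = 0
--     for f in factors:
--         if f < prev:
--             raise ValueError("factors must be positive integers and sorted in ascending order")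
--         prev = f
--     terms = []
--     i = 0
--     n = len(factors)
--     while i < n:
--         j = i + 1
--         while j < n and factors[j] == factors[i]:
--             j += 1
--         count = j - i
--         v = factors[i]
--         terms.append(f"{v}^{count}" if count > 1 else str(v))
--         i = j
--     return " \\cdot ".join(terms)
-- ===== Notes on version B (the rewrite author's own statement) =====
-- stated objective: idiomatic
-- what changed: Replaces A's running last_factor/last_factor_exp accumulator with a separate validation pass, explicit run-grouping by index scan producing a list of formatted terms, and a single ' \cdot '.join, eliminating the 0-sentinel and the string accumulator.
-- intended difference: On sorted nonnegative lists containing 0 together with a nonzero factor (e.g. [0,2]), A silently drops the run of zeros because it uses last_factor=0 as a 'no previous factor' sentinel and returns e.g. '2', while B formats every run and returns '0 \cdot 2', the intended formatting of the given list. — e.g. on format_factors([0, 2]): A returns "2", B returns "0 \\cdot 2"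
import Mathlib
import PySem

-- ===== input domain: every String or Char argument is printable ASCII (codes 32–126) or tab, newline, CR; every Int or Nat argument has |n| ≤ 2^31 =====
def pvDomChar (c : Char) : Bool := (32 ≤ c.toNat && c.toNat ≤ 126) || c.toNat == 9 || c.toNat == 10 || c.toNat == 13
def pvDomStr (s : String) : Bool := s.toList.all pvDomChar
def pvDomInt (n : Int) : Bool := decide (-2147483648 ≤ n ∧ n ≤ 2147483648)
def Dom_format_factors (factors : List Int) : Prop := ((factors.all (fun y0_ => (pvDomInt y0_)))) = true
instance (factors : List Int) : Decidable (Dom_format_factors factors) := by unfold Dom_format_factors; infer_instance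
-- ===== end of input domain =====

-- B replaces A's running last_factor/last_factor_exp accumulator by a validation pass, explicit
-- run-grouping producing a list of formatted terms, and a single join (idiomatic decomposition;
-- return-value equivalence only).

-- ===== PORT A =====
def pvSep : List Char := [' ', '\\', 'c', 'd', 'o', 't', ' ']

def pvAddFactor (expression : List Char) (factor exp : Int) : List Char :=
  let e := if expression.length > 0 then expression ++ pvSep else expression
  if exp > 1 then e ++ PySem.Int.toChars factor ++ ['^'] ++ PySem.Int.toChars exp
  else e ++ PySem.Int.toChars factor

def pvALoop : List Int → Int → Int → List Char → List Char
  | [], last, exp, expr => pvAddFactor expr last exp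
  | f :: rest, last, exp, expr =>
    if f < last then []    -- ValueError (unsorted / negative); excluded by Pre_
    else if f = last then pvALoop rest last (exp + 1) expr
    else pvALoop rest f 1 (if last ≠ 0 then pvAddFactor expr last exp else expr)

def format_factors (factors : List Int) : String :=
  if factors = [] then ""  -- ValueError (empty list); excluded by Pre_
  else String.mk (pvALoop factors 0 0 [])

-- ===== PORT B =====
def pvSortedCheck : List Int → Int → Bool
  | [], _ => true
  | f :: rest, prev => if f < prev then false else pvSortedCheck rest f

def pvTakeRun (v : Int) : List Int → Nat × List Int
  | [] => (0, [])
  | x :: xs => if x = v then ((pvTakeRun v xs).1 + 1, (pvTakeRun v xs).2) else (0, x :: xs)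

def pvFmt (v : Int) (c : Nat) : List Char :=
  if c > 1 then PySem.Int.toChars v ++ ['^'] ++ PySem.Int.toChars (c : Int)
  else PySem.Int.toChars v

-- the while loop over indices i < n advances by at least one position per iteration;
-- the fuel argument (initially the list length) mirrors that bound structurally
def pvBTermsF : Nat → List Int → List (List Char)
  | 0, _ => []
  | _, [] => []
  | fuel + 1, f :: rest =>
    pvFmt f ((pvTakeRun f rest).1 + 1) :: pvBTermsF fuel (pvTakeRun f rest).2

def pvBTerms (l : List Int) : List (List Char) := pvBTermsF l.length l

def format_factors_alt (factors : List Int) : String :=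
  if factors = [] then ""  -- ValueError (empty list); excluded by Pre_
  else if pvSortedCheck factors 0 = false then ""  -- ValueError; excluded by Pre_
  else String.mk (PySem.Chars.join pvSep (pvBTerms factors))

-- ===== PRECONDITION & SPEC =====
-- Pre_ excludes exactly the inputs where A raises ValueError: the empty list and lists
-- that are unsorted or contain a negative element.
def Pre_format_factors (factors : List Int) : Prop :=
  factors ≠ [] ∧ List.Pairwise (· ≤ ·) factors ∧ ∀ f ∈ factors, 0 ≤ f
instance (factors : List Int) : Decidable (Pre_format_factors factors) := by
  unfold Pre_format_factors; infer_instance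

def pvWitness_format_factors : List Int := [2, 2, 3]

-- On sorted nonnegative lists containing 0 together with a nonzero factor, A silently drops the
-- run of zeros (its 0-sentinel means "no previous factor") and returns e.g. "2" on [0,2], while
-- B formats every run and returns "0 \cdot 2", the intended formatting of the given list.
def D_format_factors (factors : List Int) : Prop :=
  0 ∈ factors ∧ ∃ f ∈ factors, f ≠ 0
instance (factors : List Int) : Decidable (D_format_factors factors) := by
  unfold D_format_factors; infer_instance

def Spec_format_factors (factors : List Int) (out : String) : Prop :=
  ¬ D_format_factors factors → out = format_factors_alt factors
instance (factors : List Int) (out : String) : Decidable (Spec_format_factors factors out) := by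
  unfold Spec_format_factors; infer_instance

def pvDiffWitness_format_factors : List Int := [0, 2]
def pvDiffWitnessOut_format_factors : String × String := ("2", "0 \\cdot 2")

-- ===== CLAIM (what is proved, stated in full; the proofs are below) =====
def Claim_unchanged_format_factors : Prop := ∀ (factors : List Int), Dom_format_factors factors → Pre_format_factors factors → Spec_format_factors factors (format_factors factors)
def Claim_changed_format_factors : Prop := Dom_format_factors (pvDiffWitness_format_factors) ∧ Pre_format_factors (pvDiffWitness_format_factors) ∧ D_format_factors (pvDiffWitness_format_factors) ∧ format_factors (pvDiffWitness_format_factors) = pvDiffWitnessOut_format_factors.1 ∧ format_factors_alt (pvDiffWitness_format_factors) = pvDiffWitnessOut_format_factors.2 ∧ pvDiffWitnessOut_format_factors.1 ≠ pvDiffWitnessOut_format_factors.2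
def Claim_exact_format_factors : Prop := ∀ (factors : List Int), Dom_format_factors factors → Pre_format_factors factors → D_format_factors factors → format_factors factors ≠ format_factors_alt factors

-- ===== LEMMAS AND PROOFS =====
theorem pvTakeRun_snd_length_le (v : Int) (l : List Int) : (pvTakeRun v l).2.length ≤ l.length := by
  induction l with
  | nil => simp [pvTakeRun]
  | cons x xs ih =>
    by_cases h : x = v <;> simp [pvTakeRun, h] <;> omega

theorem pvBTermsF_congr (fuel : Nat) : ∀ (fuel' : Nat) (l : List Int),
    l.length ≤ fuel → l.length ≤ fuel' → pvBTermsF fuel l = pvBTermsF fuel' l := by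
  induction fuel with
  | zero =>
    intro fuel' l h _
    have : l = [] := List.eq_nil_of_length_eq_zero (by omega)
    subst this
    cases fuel' <;> simp [pvBTermsF]
  | succ fuel ih =>
    intro fuel' l h h'
    cases l with
    | nil => cases fuel' <;> simp [pvBTermsF]
    | cons f rest =>
      cases fuel' with
      | zero => simp at h'
      | succ fuel'' =>
        simp only [pvBTermsF]
        have hle := pvTakeRun_snd_length_le f rest
        simp only [List.length_cons] at h h'
        rw [ih fuel'' (pvTakeRun f rest).2 (by omega) (by omega)]

theorem pvBTerms_cons (f : Int) (rest : List Int) :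
    pvBTerms (f :: rest) =
      pvFmt f ((pvTakeRun f rest).1 + 1) :: pvBTerms (pvTakeRun f rest).2 := by
  have hle := pvTakeRun_snd_length_le f rest
  simp only [pvBTerms, List.length_cons, pvBTermsF]
  rw [pvBTermsF_congr rest.length (pvTakeRun f rest).2.length (pvTakeRun f rest).2
    (by omega) (le_refl _)]
theorem pvToChars_ne_nil (n : Int) : PySem.Int.toChars n ≠ [] := by
  unfold PySem.Int.toChars
  split
  · simp
  · exact List.ne_nil_of_length_pos Nat.length_toDigits_pos

theorem pvFmt_ne_nil (v : Int) (c : Nat) : pvFmt v c ≠ [] := by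
  unfold pvFmt
  split
  · simp
  · exact pvToChars_ne_nil v

-- the step A's accumulator performs for one formatted term
def pvAddTerm (e t : List Char) : List Char :=
  (if e.length > 0 then e ++ pvSep else e) ++ t

theorem pvAddFactor_eq (expr : List Char) (v : Int) (c : Nat) :
    pvAddFactor expr v (c : Int) = pvAddTerm expr (pvFmt v c) := by
  unfold pvAddFactor pvAddTerm pvFmt
  have h : ((c : Int) > 1) ↔ (c > 1) := by exact_mod_cast Iff.rfl
  by_cases hc : c > 1 <;> simp [h, hc, List.append_assoc]

theorem pvTakeRun_all_eq (v : Int) (l : List Int) (h : ∀ x ∈ l, x = v) :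
    pvTakeRun v l = (l.length, []) := by
  induction l with
  | nil => simp [pvTakeRun]
  | cons x xs ih =>
    have hx : x = v := h x (by simp)
    simp [pvTakeRun, hx, ih (fun y hy => h y (by simp [hy]))]

theorem pvTakeRun_snd_nil (v : Int) (l : List Int) (h : (pvTakeRun v l).2 = []) :
    ∀ x ∈ l, x = v := by
  induction l with
  | nil => simp
  | cons x xs ih =>
    by_cases hx : x = v
    · simp only [pvTakeRun, hx, if_pos rfl] at h
      intro y hy
      rcases List.mem_cons.mp hy with rfl | hy'
      · exact hx
      · exact ih h y hy'
    · simp [pvTakeRun, hx] at h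

theorem pvTakeRun_snd_suffix (v : Int) (l : List Int) : (pvTakeRun v l).2 <:+ l := by
  induction l with
  | nil => simp [pvTakeRun]
  | cons x xs ih =>
    by_cases hx : x = v
    · simp only [pvTakeRun, hx, if_pos rfl]
      exact ih.trans (List.suffix_cons v xs)
    · simp [pvTakeRun, hx]

theorem pvTakeRun_snd_head_ne (v : Int) (l : List Int) (g : Int) (pos : List Int)
    (h : (pvTakeRun v l).2 = g :: pos) : g ≠ v := by
  induction l with
  | nil => simp [pvTakeRun] at h
  | cons x xs ih =>
    by_cases hx : x = v
    · simp only [pvTakeRun, hx, if_pos rfl] at h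
      exact ih h
    · simp [pvTakeRun, hx] at h
      rcases h with ⟨h1, _⟩
      exact h1 ▸ hx

theorem pv_foldl_addTerm (ts : List (List Char)) : ∀ (a : List Char), a ≠ [] →
    List.foldl pvAddTerm a ts = a ++ (ts.map (pvSep ++ ·)).flatten := by
  induction ts with
  | nil => intro a _; simp
  | cons t ts ih =>
    intro a ha
    have hlen : a.length > 0 := List.length_pos_iff.mpr ha
    have h1 : pvAddTerm a t = a ++ pvSep ++ t := by simp [pvAddTerm, hlen]
    have h2 : a ++ pvSep ++ t ≠ [] := by simp [ha]
    simp only [List.foldl_cons, h1, ih _ h2, List.map_cons, List.flatten_cons]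
    simp [List.append_assoc]

theorem pv_join_eq_flat (ts : List (List Char)) : ∀ (t : List Char),
    PySem.Chars.join pvSep (t :: ts) = t ++ (ts.map (pvSep ++ ·)).flatten := by
  induction ts with
  | nil => intro t; simp [PySem.Chars.join_singleton]
  | cons u ts ih =>
    intro t
    rw [PySem.Chars.join_cons_cons, ih u]
    simp [List.append_assoc]

theorem pv_foldl_nil_eq_join (t : List Char) (ts : List (List Char)) (ht : t ≠ []) :
    List.foldl pvAddTerm [] (t :: ts) = PySem.Chars.join pvSep (t :: ts) := by
  have h0 : pvAddTerm [] t = t := by simp [pvAddTerm]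
  rw [List.foldl_cons, h0, pv_foldl_addTerm ts t ht, pv_join_eq_flat ts t]

theorem pvALoop_eq (l : List Int) : ∀ (v : Int) (c : Nat) (expr : List Char),
    0 < v → 1 ≤ c → List.Pairwise (· ≤ ·) (v :: l) →
    pvALoop l v (c : Int) expr =
      List.foldl pvAddTerm expr
        (pvFmt v (c + (pvTakeRun v l).1) :: pvBTerms (pvTakeRun v l).2) := by
  induction l with
  | nil =>
    intro v c expr _ _ _
    simp [pvALoop, pvTakeRun, pvBTerms, pvBTermsF, pvAddFactor_eq]
  | cons f rest ih =>
    intro v c expr hv hc hpw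
    have hvf : v ≤ f := (List.pairwise_cons.mp hpw).1 f (by simp)
    have hpwtail : List.Pairwise (· ≤ ·) (f :: rest) := (List.pairwise_cons.mp hpw).2
    by_cases hfv : f = v
    · subst hfv
      have hstep : pvALoop (f :: rest) f (c : Int) expr = pvALoop rest f ((c : Int) + 1) expr := by
        simp [pvALoop]
      have hcast : (c : Int) + 1 = ((c + 1 : Nat) : Int) := by push_cast; ring
      rw [hstep, hcast, ih f (c + 1) expr hv (by omega) hpwtail]
      have htr : pvTakeRun f (f :: rest) =
          ((pvTakeRun f rest).1 + 1, (pvTakeRun f rest).2) := by simp [pvTakeRun]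
      rw [htr]
      have h' : c + 1 + (pvTakeRun f rest).1 = c + ((pvTakeRun f rest).1 + 1) := by omega
      rw [h']
    · have hlt : v < f := lt_of_le_of_ne hvf (fun h => hfv h.symm)
      have hstep : pvALoop (f :: rest) v (c : Int) expr =
          pvALoop rest f 1 (pvAddFactor expr v (c : Int)) := by
        have h1 : ¬ (f < v) := not_lt.mpr hvf
        have h2 : v ≠ 0 := by omega
        simp [pvALoop, h1, hfv, h2]
      have hone : (1 : Int) = ((1 : Nat) : Int) := by norm_num
      rw [hstep, pvAddFactor_eq, hone,
        ih f 1 (pvAddTerm expr (pvFmt v c)) (by omega) (le_refl 1) hpwtail]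
      have htr : pvTakeRun v (f :: rest) = (0, f :: rest) := by simp [pvTakeRun, hfv]
      rw [htr]
      have hbt := pvBTerms_cons f rest
      have hc0 : c + (0:Nat) = c := by omega
      have h1t : (1:Nat) + (pvTakeRun f rest).1 = (pvTakeRun f rest).1 + 1 := by omega
      simp only [hbt, List.foldl_cons, hc0, h1t]

theorem pvALoop_zeros (l : List Int) : ∀ (c : Nat), (∀ x ∈ l, x = (0 : Int)) →
    pvALoop l 0 (c : Int) [] = pvAddFactor [] 0 ((c + l.length : Nat) : Int) := by
  induction l with
  | nil => intro c _; simp [pvALoop]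
  | cons x xs ih =>
    intro c h
    have hx : x = 0 := h x (by simp)
    have hstep : pvALoop (x :: xs) 0 (c : Int) [] = pvALoop xs 0 ((c : Int) + 1) [] := by
      simp [pvALoop, hx]
    have hcast : (c : Int) + 1 = ((c + 1 : Nat) : Int) := by push_cast; ring
    rw [hstep, hcast, ih (c + 1) (fun y hy => h y (by simp [hy]))]
    congr 2
    simp
    omega

theorem pvALoop_skip (l : List Int) : ∀ (c : Nat) (g : Int) (pos : List Int),
    (∀ x ∈ l, 0 ≤ x) → (pvTakeRun 0 l).2 = g :: pos →
    pvALoop l 0 (c : Int) [] = pvALoop pos g 1 [] := by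
  induction l with
  | nil => intro c g pos _ h; simp [pvTakeRun] at h
  | cons x xs ih =>
    intro c g pos hnn h
    by_cases hx : x = 0
    · subst hx
      simp only [pvTakeRun, if_pos rfl] at h
      have hstep : pvALoop ((0:Int) :: xs) 0 (c : Int) [] = pvALoop xs 0 ((c : Int) + 1) [] := by
        simp [pvALoop]
      have hcast : (c : Int) + 1 = ((c + 1 : Nat) : Int) := by push_cast; ring
      rw [hstep, hcast, ih (c + 1) g pos (fun y hy => hnn y (by simp [hy])) h]
    · have hpos : 0 < x := lt_of_le_of_ne (hnn x (by simp)) (fun h' => hx h'.symm)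
      have htr : pvTakeRun 0 (x :: xs) = (0, x :: xs) := by simp [pvTakeRun, hx]
      rw [htr] at h
      injection h with hxg hxs
      subst hxg; subst hxs
      have hlt : ¬ (x < (0:Int)) := not_lt.mpr (le_of_lt hpos)
      simp [pvALoop, hlt, hx]

theorem pvSortedCheck_true (l : List Int) : ∀ (prev : Int),
    (∀ x ∈ l, prev ≤ x) → List.Pairwise (· ≤ ·) l → pvSortedCheck l prev = true := by
  induction l with
  | nil => intro prev _ _; simp [pvSortedCheck]
  | cons f rest ih =>
    intro prev hle hpw
    have h1 : prev ≤ f := hle f (by simp)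
    exact by
      simp [pvSortedCheck, not_lt.mpr h1,
        ih f (List.pairwise_cons.mp hpw).1 (List.pairwise_cons.mp hpw).2]

-- A on a sorted, nonnegative, nonempty list whose head is positive equals the join of B's terms.
theorem pvA_pos (f : Int) (rest : List Int) (hf : 0 < f)
    (hpw : List.Pairwise (· ≤ ·) (f :: rest)) :
    pvALoop (f :: rest) 0 0 [] = PySem.Chars.join pvSep (pvBTerms (f :: rest)) := by
  have h1 : ¬ (f < (0:Int)) := not_lt.mpr (le_of_lt hf)
  have h2 : f ≠ 0 := by omega
  have hstep : pvALoop (f :: rest) 0 0 [] = pvALoop rest f 1 [] := by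
    simp [pvALoop, h1, h2]
  have hone : (1 : Int) = ((1 : Nat) : Int) := by norm_num
  rw [hstep, hone, pvALoop_eq rest f 1 [] hf (le_refl 1) hpw]
  have hcomm : (1 : Nat) + (pvTakeRun f rest).1 = (pvTakeRun f rest).1 + 1 := by omega
  rw [hcomm, pv_foldl_nil_eq_join _ _ (pvFmt_ne_nil f _)]
  rw [pvBTerms_cons]

theorem pv_sortedCheck_of_pre (factors : List Int) (hch : List.Pairwise (· ≤ ·) factors)
    (hnn : ∀ f ∈ factors, 0 ≤ f) : pvSortedCheck factors 0 = true :=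
  pvSortedCheck_true factors 0 hnn hch

-- ===== VERDICT (by name: the statement is the Claim_ definition above) =====
theorem format_factors_spec : Claim_unchanged_format_factors := by
  intro factors _ hpre
  intro hnD
  obtain ⟨hne, hch, hnn⟩ := hpre
  cases factors with
  | nil => exact absurd rfl hne
  | cons f rest =>
    have hpw : List.Pairwise (· ≤ ·) (f :: rest) := hch
    have hA : format_factors (f :: rest) = String.mk (pvALoop (f :: rest) 0 0 []) := by
      simp [format_factors]
    have hB : format_factors_alt (f :: rest) =
        String.mk (PySem.Chars.join pvSep (pvBTerms (f :: rest))) := by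
      simp [format_factors_alt, pv_sortedCheck_of_pre (f :: rest) hch hnn]
    rw [hA, hB]
    by_cases h0 : (0:Int) ∈ f :: rest
    · -- no nonzero element, else D would hold: the list is all zeros
      have hall : ∀ x ∈ f :: rest, x = (0:Int) := by
        intro x hx
        by_contra hxne
        exact hnD ⟨h0, x, hx, hxne⟩
      have hf0 : f = 0 := hall f (by simp)
      subst hf0
      have hrest : ∀ x ∈ rest, x = (0:Int) := fun y hy => hall y (by simp [hy])
      have hstep : pvALoop ((0:Int) :: rest) 0 0 [] = pvALoop rest 0 ((1:Nat) : Int) [] := by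
        simp [pvALoop]
      rw [hstep, pvALoop_zeros rest 1 hrest]
      have hbt : pvBTerms ((0:Int) :: rest) = [pvFmt 0 (rest.length + 1)] := by
        rw [pvBTerms_cons, pvTakeRun_all_eq 0 rest hrest]
        simp [pvBTerms, pvBTermsF]
      rw [hbt, PySem.Chars.join_singleton]
      have : (1 + rest.length : Nat) = rest.length + 1 := by omega
      rw [this, pvAddFactor_eq]
      simp [pvAddTerm]
    · have hf : 0 < f := by
        have := hnn f (by simp)
        have : f ≠ 0 := fun h => h0 (by simp [h])
        omega
      rw [pvA_pos f rest hf hpw]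

theorem format_factors_changed : Claim_changed_format_factors := by
  unfold Claim_changed_format_factors; decide

theorem format_factors_tight : Claim_exact_format_factors := by
  intro factors _ hpre hD
  obtain ⟨hne, hch, hnn⟩ := hpre
  obtain ⟨h0, g0, hg0mem, hg0ne⟩ := hD
  cases factors with
  | nil => exact absurd rfl hne
  | cons f rest =>
    have hpw : List.Pairwise (· ≤ ·) (f :: rest) := hch
    -- head is 0: it is ≤ every element and the list contains 0 and is nonnegative
    have hf0 : f = 0 := by
      rcases List.mem_cons.mp h0 with h | h
      · omega
      · have h1 : f ≤ 0 := (List.pairwise_cons.mp hpw).1 0 h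
        have h2 : 0 ≤ f := hnn f (by simp)
        omega
    subst hf0
    -- the nonzero element lives in rest, so the zero run does not exhaust the list
    have hrestnn : ∀ x ∈ rest, 0 ≤ x := fun y hy => hnn y (by simp [hy])
    have hsplit : ∃ g pos, (pvTakeRun 0 rest).2 = g :: pos := by
      cases heq : (pvTakeRun 0 rest).2 with
      | nil =>
        have hall := pvTakeRun_snd_nil 0 rest heq
        rcases List.mem_cons.mp hg0mem with h | h
        · exact absurd h hg0ne
        · exact absurd (hall g0 h) hg0ne
      | cons g pos => exact ⟨g, pos, rfl⟩
    obtain ⟨g, pos, hgp⟩ := hsplit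
    have hgne : g ≠ 0 := pvTakeRun_snd_head_ne 0 rest g pos hgp
    have hgmem : g ∈ rest := (pvTakeRun_snd_suffix 0 rest).subset (hgp ▸ List.mem_cons_self ..)
    have hgpos : 0 < g := by have := hrestnn g hgmem; omega
    have hpwg : List.Pairwise (· ≤ ·) (g :: pos) :=
      hpw.sublist ((hgp ▸ (pvTakeRun_snd_suffix 0 rest)).sublist.cons 0)
    -- A's value: skip the zeros, then the positive tail
    have hstep : pvALoop ((0:Int) :: rest) 0 0 [] = pvALoop rest 0 ((1:Nat) : Int) [] := by
      simp [pvALoop]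
    have hA : format_factors ((0:Int) :: rest) =
        String.mk (PySem.Chars.join pvSep (pvBTerms (g :: pos))) := by
      have h1 : ¬ (g < (0:Int)) := not_lt.mpr (le_of_lt hgpos)
      have hAg : pvALoop ((0:Int) :: rest) 0 0 [] = pvALoop (g :: pos) 0 0 [] := by
        rw [hstep, pvALoop_skip rest 1 g pos hrestnn hgp]
        simp [pvALoop, h1, hgne]
      simp only [format_factors, if_neg (by simp : ¬ ((0:Int) :: rest = []))]
      rw [hAg, pvA_pos g pos hgpos hpwg]
    -- B's value: an extra leading zero term
    have hB : format_factors_alt ((0:Int) :: rest) =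
        String.mk (PySem.Chars.join pvSep
          (pvFmt 0 ((pvTakeRun 0 rest).1 + 1) :: pvBTerms (g :: pos))) := by
      have hchk := pv_sortedCheck_of_pre ((0:Int) :: rest) hch hnn
      simp only [format_factors_alt, if_neg (by simp : ¬ ((0:Int) :: rest = [])), hchk,
        Bool.true_eq_false, if_false]
      rw [pvBTerms_cons, hgp]
    rw [hA, hB]
    -- the two joined strings have different lengths
    intro hEq
    have hlists : PySem.Chars.join pvSep (pvBTerms (g :: pos)) =
        PySem.Chars.join pvSep (pvFmt 0 ((pvTakeRun 0 rest).1 + 1) :: pvBTerms (g :: pos)) :=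
      String.ofList_inj.mp hEq
    have hbt := pvBTerms_cons g pos
    have hlen := congrArg List.length hlists
    rw [hbt, pv_join_eq_flat, pv_join_eq_flat] at hlen
    simp [pvSep] at hlen
    omega
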